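-- pv_equiv track=rewrite | github.com/Besatkassaie/NAUS | preprocess_align.py | remove_problematic_alignments
-- ===== SOURCE A (Python) =====
-- def remove_problematic_alignments(final_alignment_4_query, queries_with_problematic_alignments, track_columns_reverse):
--     output=set()
--     seen=set()
--     # Group second elements by their first element
--     for col_pair in final_alignment_4_query:
--         dl_col = track_columns_reverse[col_pair[1]]
--         query_col= track_columns_reverse[col_pair[0]]
--         query_table_name=query_col[0]
--         query_column=query_col[1]
--         query_columnnumber=query_col[2]
--         dl_table_name=dl_col[0]
--         dl_column=dl_col[1]
--         dl_columnnumber=dl_col[2]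
--         temp=(query_columnnumber, dl_table_name)
--         if temp  in   seen:
--                 if query_table_name in queries_with_problematic_alignments:
--                       queries_with_problematic_alignments[query_table_name].add(col_pair)
--                 else:
--                       queries_with_problematic_alignments[query_table_name] = {col_pair}
--
--         else:
--           seen.add(temp)
--           output.add(col_pair)
--
--     return  output, queries_with_problematic_alignments
-- ===== SOURCE B (Python) =====
-- def remove_problematic_alignments(final_alignment_4_query, queries_with_problematic_alignments, track_columns_reverse):
--     # Pass 0: decode every col_pair once into (temp, query_table_name, col_pair).
--     decoded = [((track_columns_reverse[q][2], track_columns_reverse[d][0]),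
--                 track_columns_reverse[q][0],
--                 (q, d))
--                for (q, d) in final_alignment_4_query]
--     # Pass 1: ordered index temp -> index of its first occurrence.
--     first = {}
--     for i, (t, _, _) in enumerate(decoded):
--         first.setdefault(t, i)
--     # Pass 2: representatives (first occurrence of each temp) form the output set.
--     output = {cp for i, (t, _, cp) in enumerate(decoded) if first[t] == i}
--     # Pass 3: every non-representative is a conflict for its query table.
--     for i, (t, qname, cp) in enumerate(decoded):
--         if first[t] != i:
--             queries_with_problematic_alignments.setdefault(qname, set()).add(cp)
--     return output, queries_with_problematic_alignments
-- ===== Notes on version B (the rewrite author's own statement) =====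
-- stated objective: alternative
-- what changed: Replaces A's single online loop with a mutable 'seen' set by a multi-pass decomposition: decode every pair once into (temp, query-table, pair), build an ordered first-occurrence index temp->position, then partition positionally into representatives (output) and conflicts (appended into the problematic dict).
import Mathlib
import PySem

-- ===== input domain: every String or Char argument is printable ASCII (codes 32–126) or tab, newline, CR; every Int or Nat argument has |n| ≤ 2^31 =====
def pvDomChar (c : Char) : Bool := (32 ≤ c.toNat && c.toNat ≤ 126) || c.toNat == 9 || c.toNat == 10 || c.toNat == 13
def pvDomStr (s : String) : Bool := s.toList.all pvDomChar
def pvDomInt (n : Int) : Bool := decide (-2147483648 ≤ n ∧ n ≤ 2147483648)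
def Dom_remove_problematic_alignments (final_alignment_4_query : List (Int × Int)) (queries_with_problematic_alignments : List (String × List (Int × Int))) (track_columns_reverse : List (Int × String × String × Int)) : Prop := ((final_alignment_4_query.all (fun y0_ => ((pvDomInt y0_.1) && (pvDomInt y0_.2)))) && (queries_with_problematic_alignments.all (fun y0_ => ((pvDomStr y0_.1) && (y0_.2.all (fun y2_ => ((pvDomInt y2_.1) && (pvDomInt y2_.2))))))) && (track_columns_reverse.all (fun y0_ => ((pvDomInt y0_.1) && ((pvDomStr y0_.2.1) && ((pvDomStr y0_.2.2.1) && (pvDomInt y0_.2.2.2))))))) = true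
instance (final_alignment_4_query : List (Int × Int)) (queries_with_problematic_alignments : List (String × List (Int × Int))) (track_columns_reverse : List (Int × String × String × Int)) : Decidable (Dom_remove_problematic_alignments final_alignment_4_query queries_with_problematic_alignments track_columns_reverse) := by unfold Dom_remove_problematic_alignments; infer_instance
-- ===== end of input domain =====

-- ===== PORT A =====
-- B deduplicates by a precomputed first-occurrence index in separate passes instead of A's online seen-set (objective: alternative decomposition; both mutate the problematic dict in place in Python — equivalence here is about the return value, which contains that dict).
-- A's loop body as a named step function (state: (output, problematic-dict, seen)).
-- track_columns_reverse[...] is a dict lookup; Python raises KeyError on a missing key, so Pre_ requires both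
-- components of every col_pair to be keys; 'getD' with a dummy default is only reached outside Pre_.
def rpaStepA (track_columns_reverse : List (Int × String × String × Int))
    (st : PySem.Set (Int × Int) × PySem.Dict String (List (Int × Int)) × PySem.Set (Int × String))
    (col_pair : Int × Int) :
    PySem.Set (Int × Int) × PySem.Dict String (List (Int × Int)) × PySem.Set (Int × String) :=
  let dl_col := (PySem.Dict.mk track_columns_reverse).getD col_pair.2 ("", "", 0)
  let query_col := (PySem.Dict.mk track_columns_reverse).getD col_pair.1 ("", "", 0)
  let query_table_name := query_col.1
  let query_columnnumber := query_col.2.2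
  let dl_table_name := dl_col.1
  let temp := (query_columnnumber, dl_table_name)
  if PySem.Set.contains st.2.2 temp then
    (st.1,
     if PySem.Dict.contains st.2.1 query_table_name then
       PySem.Dict.insert st.2.1 query_table_name
         (PySem.Set.add (PySem.Dict.getD st.2.1 query_table_name []) col_pair)
     else
       PySem.Dict.insert st.2.1 query_table_name [col_pair],
     st.2.2)
  else
    (PySem.Set.add st.1 col_pair, st.2.1, PySem.Set.add st.2.2 temp)

def remove_problematic_alignments (final_alignment_4_query : List (Int × Int)) (queries_with_problematic_alignments : List (String × List (Int × Int))) (track_columns_reverse : List (Int × String × String × Int)) : (List (Int × Int)) × (List (String × List (Int × Int))) :=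
  let st := final_alignment_4_query.foldl (rpaStepA track_columns_reverse)
    (PySem.Set.empty, PySem.Dict.mk queries_with_problematic_alignments, PySem.Set.empty)
  (st.1, (st.2.1).items)

-- ===== PORT B =====
-- decode one col_pair into (temp, query_table_name, col_pair)
def rpaDecode (track_columns_reverse : List (Int × String × String × Int)) (cp : Int × Int) :
    (Int × String) × String × (Int × Int) :=
  (((((PySem.Dict.mk track_columns_reverse).getD cp.1 ("", "", 0)).2.2),
    (((PySem.Dict.mk track_columns_reverse).getD cp.2 ("", "", 0)).1)),
   (((PySem.Dict.mk track_columns_reverse).getD cp.1 ("", "", 0)).1),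
   cp)

-- Pass 1: ordered index temp -> index of first occurrence ('for i, (t, _, _) in enumerate(decoded): first.setdefault(t, i)')
def rpaFirst : List ((Int × String) × String × (Int × Int)) → Nat → PySem.Dict (Int × String) Nat → PySem.Dict (Int × String) Nat
  | [], _, d => d
  | e :: r, i, d => rpaFirst r (i + 1) (PySem.Dict.setdefault d e.1 i)

-- Pass 2: '{cp for i, (t, _, cp) in enumerate(decoded) if first[t] == i}'
def rpaOut (first : PySem.Dict (Int × String) Nat) :
    List ((Int × String) × String × (Int × Int)) → Nat → PySem.Set (Int × Int) → PySem.Set (Int × Int)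
  | [], _, o => o
  | e :: r, i, o => rpaOut first r (i + 1) (if PySem.Dict.getD first e.1 0 = i then PySem.Set.add o e.2.2 else o)

-- Pass 3: 'if first[t] != i: queries_with_problematic_alignments.setdefault(qname, set()).add(cp)'
def rpaProbs (first : PySem.Dict (Int × String) Nat) :
    List ((Int × String) × String × (Int × Int)) → Nat → PySem.Dict String (List (Int × Int)) → PySem.Dict String (List (Int × Int))
  | [], _, d => d
  | e :: r, i, d => rpaProbs first r (i + 1)
      (if PySem.Dict.getD first e.1 0 = i then d
       else PySem.Dict.modify d e.2.1 [] (fun s => PySem.Set.add s e.2.2))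

def remove_problematic_alignments_alt (final_alignment_4_query : List (Int × Int)) (queries_with_problematic_alignments : List (String × List (Int × Int))) (track_columns_reverse : List (Int × String × String × Int)) : (List (Int × Int)) × (List (String × List (Int × Int))) :=
  let decoded := final_alignment_4_query.map (rpaDecode track_columns_reverse)
  let first := rpaFirst decoded 0 PySem.Dict.empty
  let output := rpaOut first decoded 0 PySem.Set.empty
  let probs := rpaProbs first decoded 0 (PySem.Dict.mk queries_with_problematic_alignments)
  (output, probs.items)

-- ===== PRECONDITION & SPEC =====
-- Pre_ excludes exactly the inputs on which A raises KeyError: a col_pair component that is not a key of track_columns_reverse.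
def Pre_remove_problematic_alignments (final_alignment_4_query : List (Int × Int)) (queries_with_problematic_alignments : List (String × List (Int × Int))) (track_columns_reverse : List (Int × String × String × Int)) : Prop :=
  ∀ cp ∈ final_alignment_4_query,
    (PySem.Dict.mk track_columns_reverse).contains cp.1 = true ∧
    (PySem.Dict.mk track_columns_reverse).contains cp.2 = true
instance (final_alignment_4_query : List (Int × Int)) (queries_with_problematic_alignments : List (String × List (Int × Int))) (track_columns_reverse : List (Int × String × String × Int)) : Decidable (Pre_remove_problematic_alignments final_alignment_4_query queries_with_problematic_alignments track_columns_reverse) := by unfold Pre_remove_problematic_alignments; infer_instance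

def pvWitness_remove_problematic_alignments : (List (Int × Int)) × (List (String × List (Int × Int))) × (List (Int × String × String × Int)) :=
  ([(0, 1), (2, 1), (0, 0)], [("p", [(5, 5)])], [(0, "q", "c", 7), (1, "d", "e", 7), (2, "q2", "c2", 7)])

def Spec_remove_problematic_alignments (final_alignment_4_query : List (Int × Int)) (queries_with_problematic_alignments : List (String × List (Int × Int))) (track_columns_reverse : List (Int × String × String × Int)) (out : (List (Int × Int)) × (List (String × List (Int × Int)))) : Prop := out = remove_problematic_alignments_alt final_alignment_4_query queries_with_problematic_alignments track_columns_reverse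
instance (final_alignment_4_query : List (Int × Int)) (queries_with_problematic_alignments : List (String × List (Int × Int))) (track_columns_reverse : List (Int × String × String × Int)) (out : (List (Int × Int)) × (List (String × List (Int × Int)))) : Decidable (Spec_remove_problematic_alignments final_alignment_4_query queries_with_problematic_alignments track_columns_reverse out) := by unfold Spec_remove_problematic_alignments; infer_instance

-- ===== CLAIM (what is proved, stated in full; the proofs are below) =====
def Claim_equal_remove_problematic_alignments : Prop := ∀ (final_alignment_4_query : List (Int × Int)) (queries_with_problematic_alignments : List (String × List (Int × Int))) (track_columns_reverse : List (Int × String × String × Int)), Dom_remove_problematic_alignments final_alignment_4_query queries_with_problematic_alignments track_columns_reverse → Pre_remove_problematic_alignments final_alignment_4_query queries_with_problematic_alignments track_columns_reverse → Spec_remove_problematic_alignments final_alignment_4_query queries_with_problematic_alignments track_columns_reverse (remove_problematic_alignments final_alignment_4_query queries_with_problematic_alignments track_columns_reverse)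

-- ===== LEMMAS AND PROOFS =====

-- Reference formulation of both loops: scan the decoded list carrying the set of temps already seen.
def rpaOutSeen : List ((Int × String) × String × (Int × Int)) → PySem.Set (Int × String) → PySem.Set (Int × Int) → PySem.Set (Int × Int)
  | [], _, o => o
  | e :: r, seen, o => rpaOutSeen r (PySem.Set.add seen e.1) (if PySem.Set.contains seen e.1 then o else PySem.Set.add o e.2.2)
def rpaProbsSeen : List ((Int × String) × String × (Int × Int)) → PySem.Set (Int × String) → PySem.Dict String (List (Int × Int)) → PySem.Dict String (List (Int × Int))
  | [], _, d => d
  | e :: r, seen, d => rpaProbsSeen r (PySem.Set.add seen e.1)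
      (if PySem.Set.contains seen e.1 then PySem.Dict.modify d e.2.1 [] (fun s => PySem.Set.add s e.2.2) else d)
lemma rpa_modify_eq_branch (d : PySem.Dict String (List (Int × Int))) (q : String) (cp : Int × Int) :
    (if PySem.Dict.contains d q then
       PySem.Dict.insert d q (PySem.Set.add (PySem.Dict.getD d q []) cp)
     else PySem.Dict.insert d q [cp])
    = PySem.Dict.modify d q [] (fun s => PySem.Set.add s cp) := by
  by_cases h : PySem.Dict.contains d q
  · simp [h, PySem.Dict.modify]
  · simp only [Bool.not_eq_true] at h
    simp [h, PySem.Dict.modify, PySem.Dict.getD_of_not_contains _ _ h, PySem.Set.add]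

lemma rpa_foldA (tcr : List (Int × String × String × Int)) :
    ∀ (l : List (Int × Int)) (o : PySem.Set (Int × Int)) (d : PySem.Dict String (List (Int × Int))) (seen : PySem.Set (Int × String)),
    l.foldl (rpaStepA tcr) (o, d, seen)
      = (rpaOutSeen (l.map (rpaDecode tcr)) seen o,
         rpaProbsSeen (l.map (rpaDecode tcr)) seen d,
         (l.map (rpaDecode tcr)).foldl (fun s e => PySem.Set.add s e.1) seen) := by
  intro l
  induction l with
  | nil => intro o d seen; rfl
  | cons cp r ih =>
    intro o d seen
    rw [List.foldl_cons, List.map_cons]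
    by_cases h : PySem.Set.contains seen (((PySem.Dict.mk tcr).getD cp.1 ("", "", 0)).2.2, ((PySem.Dict.mk tcr).getD cp.2 ("", "", 0)).1)
    · have hadd : PySem.Set.add seen (((PySem.Dict.mk tcr).getD cp.1 ("", "", 0)).2.2, ((PySem.Dict.mk tcr).getD cp.2 ("", "", 0)).1) = seen := by
        simp only [PySem.Set.add, h, if_true]
      have hstep : rpaStepA tcr (o, d, seen) cp
          = (o, PySem.Dict.modify d ((PySem.Dict.mk tcr).getD cp.1 ("", "", 0)).1 [] (fun s => PySem.Set.add s cp), seen) := by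
        simp only [rpaStepA, h, if_true, rpa_modify_eq_branch]
      rw [hstep, ih]
      show _ = (rpaOutSeen _ (PySem.Set.add seen _) _, rpaProbsSeen _ (PySem.Set.add seen _) _, List.foldl _ (PySem.Set.add seen _) _)
      rw [show (rpaDecode tcr cp).1 = (((PySem.Dict.mk tcr).getD cp.1 ("", "", 0)).2.2, ((PySem.Dict.mk tcr).getD cp.2 ("", "", 0)).1) from rfl, hadd]
      simp only [rpaOutSeen, rpaProbsSeen, rpaDecode, h, if_true, hadd]
    · have hstep : rpaStepA tcr (o, d, seen) cp
          = (PySem.Set.add o cp, d, PySem.Set.add seen (((PySem.Dict.mk tcr).getD cp.1 ("", "", 0)).2.2, ((PySem.Dict.mk tcr).getD cp.2 ("", "", 0)).1)) := by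
        simp only [rpaStepA, h, if_false, Bool.false_eq_true]
      rw [hstep, ih]
      simp only [rpaOutSeen, rpaProbsSeen, rpaDecode, List.foldl_cons, h, Bool.false_eq_true, if_false]
lemma rpa_first_get? :
    ∀ (l : List ((Int × String) × String × (Int × Int))) (i : Nat) (d : PySem.Dict (Int × String) Nat) (t : Int × String),
    (rpaFirst l i d).get? t = (d.get? t).or ((List.findIdx? (fun e => e.1 == t) l).map (· + i)) := by
  intro l
  induction l with
  | nil => intro i d t; simp [rpaFirst]
  | cons e r ih =>
    intro i d t
    rw [rpaFirst, ih, List.findIdx?_cons]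
    by_cases ht : e.1 = t
    · subst ht
      rw [PySem.Dict.get?_setdefault_self]
      cases hd : d.get? e.1 <;> simp
    · rw [PySem.Dict.get?_setdefault_of_ne _ _ (fun hh => ht hh.symm)]
      have : (e.1 == t) = false := by simp [ht]
      rw [this]
      simp only [Bool.false_eq_true, if_false, Option.map_map]
      congr 2
      funext j
      simp [Function.comp]
      omega

lemma rpa_first_iff (done rest : List ((Int × String) × String × (Int × Int))) (e : (Int × String) × String × (Int × Int)) :
    (PySem.Dict.getD (rpaFirst (done ++ e :: rest) 0 PySem.Dict.empty) e.1 0 = done.length)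
      ↔ e.1 ∉ done.map (fun x => x.1) := by
  rw [PySem.Dict.getD_eq_get?_getD, rpa_first_get?]
  rw [PySem.Dict.get?_empty, Option.none_or, List.findIdx?_append]
  by_cases hm : e.1 ∈ done.map (fun x => x.1)
  · rcases List.mem_map.mp hm with ⟨x, hx, hx1⟩
    have hsome : (List.findIdx? (fun a => a.1 == e.1) done).isSome = true := by
      rw [List.findIdx?_isSome]
      exact List.any_eq_true.mpr ⟨x, hx, by simp [hx1]⟩
    rcases Option.isSome_iff_exists.mp hsome with ⟨j, hj⟩
    have hjlt : j < done.length := (List.findIdx?_eq_some_iff_findIdx_eq.mp hj).1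
    rw [hj]
    simp only [Option.some_or, Option.map_some, Option.getD_some, Nat.add_zero]
    simp only [hm, not_true_eq_false, iff_false]
    omega
  · have hnone : List.findIdx? (fun a => a.1 == e.1) done = none :=
      List.findIdx?_eq_none_iff.mpr (fun x hx => by
        simp only [beq_eq_false_iff_ne, ne_eq]
        exact fun hh => hm (List.mem_map.mpr ⟨x, hx, hh⟩))
    rw [hnone, List.findIdx?_cons]
    simp [hm]
lemma rpa_ofList_append_singleton (xs : List (Int × String)) (y : Int × String) :
    PySem.Set.ofList (xs ++ [y]) = PySem.Set.add (PySem.Set.ofList xs) y := by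
  rw [PySem.Set.ofList_eq_foldl, PySem.Set.ofList_eq_foldl, List.foldl_append]
  rfl

lemma rpa_contains_ofList (xs : List (Int × String)) (y : Int × String) :
    PySem.Set.contains (PySem.Set.ofList xs) y = decide (y ∈ xs) := by
  by_cases hm : y ∈ xs
  · simp [PySem.Set.contains, PySem.Set.mem_ofList, hm]
  · simp [PySem.Set.contains, PySem.Set.mem_ofList, hm]

lemma rpa_out_eq (dec : List ((Int × String) × String × (Int × Int))) :
    ∀ (rest done : List ((Int × String) × String × (Int × Int))) (o : PySem.Set (Int × Int)),
    dec = done ++ rest →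
    rpaOut (rpaFirst dec 0 PySem.Dict.empty) rest done.length o
      = rpaOutSeen rest (PySem.Set.ofList (done.map (fun x => x.1))) o := by
  intro rest
  induction rest with
  | nil => intro done o _; rfl
  | cons e r ih =>
    intro done o hdec
    rw [rpaOut, rpaOutSeen]
    have hcond : (if PySem.Dict.getD (rpaFirst dec 0 PySem.Dict.empty) e.1 0 = done.length then PySem.Set.add o e.2.2 else o)
        = (if PySem.Set.contains (PySem.Set.ofList (done.map (fun x => x.1))) e.1 then o else PySem.Set.add o e.2.2) := by
      rw [rpa_contains_ofList]
      by_cases hm : e.1 ∈ done.map (fun x => x.1)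
      · rw [if_neg (by rw [hdec, rpa_first_iff]; simpa using hm), if_pos (by simpa using hm)]
      · rw [if_pos (by rw [hdec, rpa_first_iff]; simpa using hm), if_neg (by simpa using hm)]
    rw [hcond]
    have h1 : done.length + 1 = (done ++ [e]).length := by simp
    have h2 : PySem.Set.add (PySem.Set.ofList (done.map (fun x => x.1))) e.1
        = PySem.Set.ofList ((done ++ [e]).map (fun x => x.1)) := by
      rw [List.map_append, List.map_singleton, rpa_ofList_append_singleton]
    rw [h1, h2]
    exact ih (done ++ [e]) _ (by simpa using hdec)

lemma rpa_probs_eq (dec : List ((Int × String) × String × (Int × Int))) :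
    ∀ (rest done : List ((Int × String) × String × (Int × Int))) (d : PySem.Dict String (List (Int × Int))),
    dec = done ++ rest →
    rpaProbs (rpaFirst dec 0 PySem.Dict.empty) rest done.length d
      = rpaProbsSeen rest (PySem.Set.ofList (done.map (fun x => x.1))) d := by
  intro rest
  induction rest with
  | nil => intro done d _; rfl
  | cons e r ih =>
    intro done d hdec
    rw [rpaProbs, rpaProbsSeen]
    have hcond : (if PySem.Dict.getD (rpaFirst dec 0 PySem.Dict.empty) e.1 0 = done.length then d
          else PySem.Dict.modify d e.2.1 [] (fun s => PySem.Set.add s e.2.2))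
        = (if PySem.Set.contains (PySem.Set.ofList (done.map (fun x => x.1))) e.1 then PySem.Dict.modify d e.2.1 [] (fun s => PySem.Set.add s e.2.2) else d) := by
      rw [rpa_contains_ofList]
      by_cases hm : e.1 ∈ done.map (fun x => x.1)
      · rw [if_neg (by rw [hdec, rpa_first_iff]; simpa using hm), if_pos (by simpa using hm)]
      · rw [if_pos (by rw [hdec, rpa_first_iff]; simpa using hm), if_neg (by simpa using hm)]
    rw [hcond]
    have h1 : done.length + 1 = (done ++ [e]).length := by simp
    have h2 : PySem.Set.add (PySem.Set.ofList (done.map (fun x => x.1))) e.1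
        = PySem.Set.ofList ((done ++ [e]).map (fun x => x.1)) := by
      rw [List.map_append, List.map_singleton, rpa_ofList_append_singleton]
    rw [h1, h2]
    exact ih (done ++ [e]) _ (by simpa using hdec)

lemma rpa_out_zero (dec : List ((Int × String) × String × (Int × Int))) (o : PySem.Set (Int × Int)) :
    rpaOut (rpaFirst dec 0 PySem.Dict.empty) dec 0 o = rpaOutSeen dec PySem.Set.empty o :=
  rpa_out_eq dec dec [] o rfl

lemma rpa_probs_zero (dec : List ((Int × String) × String × (Int × Int))) (d : PySem.Dict String (List (Int × Int))) :
    rpaProbs (rpaFirst dec 0 PySem.Dict.empty) dec 0 d = rpaProbsSeen dec PySem.Set.empty d :=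
  rpa_probs_eq dec dec [] d rfl

-- ===== VERDICT (by name: the statement is the Claim_ definition above) =====
theorem remove_problematic_alignments_spec : Claim_equal_remove_problematic_alignments := by
  intro fa qs tcr _dom _pre
  unfold Spec_remove_problematic_alignments
  unfold remove_problematic_alignments remove_problematic_alignments_alt
  dsimp only
  rw [rpa_foldA, rpa_out_zero, rpa_probs_zero]
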